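-- pv_equiv track=rewrite | github.com/vyasakanksha/munshi | munshi_app.py | get_filenumber
-- ===== SOURCE A (Python) =====
-- from itertools import groupby, chain
--
-- def get_filenumber(audio_files):
--    # generate the name for the next audio file in series by incementing the number
--    num_lst = []
--
--    if audio_files:
--       grouped = [groupby(x, str.isdigit) for x in audio_files]
--
--       for group in grouped:
--          tmp_lst = []
--          for key, grp in group:
--             if key:
--                tmp_lst.append("".join(list(grp)))
--          num_lst.append(int(tmp_lst[0]))
--    return num_lst
-- ===== SOURCE B (Python) =====
-- def get_filenumber(audio_files):
--     result = []
--     for name in audio_files: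
--         i = 0
--         while i < len(name) and not name[i].isdigit():
--             i += 1
--         j = i
--         while j < len(name) and name[j].isdigit():
--             j += 1
--         result.append(int(name[i:j]))
--     return result
-- ===== Notes on version B (the rewrite author's own statement) =====
-- stated objective: simpler
-- what changed: B replaces A's itertools.groupby grouping of every character run followed by filtering the digit groups and taking the first, by a direct two-pointer scan that skips to the first digit and takes the consecutive digit run, converting that one slice.
import Mathlib
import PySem

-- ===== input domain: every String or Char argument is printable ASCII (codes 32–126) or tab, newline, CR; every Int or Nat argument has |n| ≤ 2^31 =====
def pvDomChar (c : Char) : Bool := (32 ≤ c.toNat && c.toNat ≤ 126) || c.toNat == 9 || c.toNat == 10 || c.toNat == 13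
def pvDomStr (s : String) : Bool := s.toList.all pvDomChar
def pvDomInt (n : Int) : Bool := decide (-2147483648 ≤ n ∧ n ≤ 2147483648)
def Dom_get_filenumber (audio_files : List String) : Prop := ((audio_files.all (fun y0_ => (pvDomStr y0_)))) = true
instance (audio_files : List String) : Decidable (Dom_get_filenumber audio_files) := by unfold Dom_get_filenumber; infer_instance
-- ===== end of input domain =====

-- B replaces A's groupby-all-runs-then-filter-then-take-first by a direct skip-to-first-digit /
-- take-digit-run scan; same cost, simpler. Pre_ excludes names without digits, on which both raise.

-- ===== PORT A =====
-- itertools.groupby(x, str.isdigit): consecutive runs of equal key.  On the printable-ASCII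
-- domain str.isdigit on a single char is exactly Char.isDigit ('0'-'9').
def pvGroupby : List Char → List (Bool × List Char)
  | [] => []
  | c :: t =>
    match pvGroupby t with
    | [] => [(c.isDigit, [c])]
    | (k, g) :: rest =>
      if c.isDigit = k then (k, c :: g) :: rest
      else (c.isDigit, [c]) :: (k, g) :: rest

-- tmp_lst for one filename: the digit groups, joined to strings
def pvTmpLst (x : String) : List String :=
  ((pvGroupby x.toList).filter (fun p => p.1)).map (fun p => String.ofList p.2)

def get_filenumber (audio_files : List String) : List Int :=
  if audio_files.isEmpty then []
  else audio_files.map (fun x =>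
    -- int(tmp_lst[0]); tmp_lst[0] raises IndexError when empty — outside Pre_; 0 is a dummy there
    (PySem.Int.ofStr? ((pvTmpLst x).getD 0 "")).getD 0)

-- ===== PORT B =====
-- first while loop: advance i past non-digits; name[i:j] then starts at the first digit
def pvSkipND : List Char → List Char
  | [] => []
  | c :: t => if c.isDigit then c :: t else pvSkipND t

-- second while loop: j takes the consecutive digit run; name[i:j] is that run
def pvTakeD : List Char → List Char
  | [] => []
  | c :: t => if c.isDigit then c :: pvTakeD t else []

def get_filenumber_alt (audio_files : List String) : List Int :=
  audio_files.map (fun name =>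
    -- int(name[i:j]); int('') raises ValueError when no digit — outside Pre_; 0 is a dummy there
    (PySem.Int.ofStr? (String.ofList (pvTakeD (pvSkipND name.toList)))).getD 0)

-- ===== PRECONDITION & SPEC =====
-- Pre_ excludes inputs where some filename contains no digit: there A raises IndexError
-- (tmp_lst[0]) and B raises ValueError (int('')).
def Pre_get_filenumber (audio_files : List String) : Prop :=
  ∀ x ∈ audio_files, (x.toList.any Char.isDigit) = true
instance (audio_files : List String) : Decidable (Pre_get_filenumber audio_files) := by
  unfold Pre_get_filenumber; infer_instance
def pvWitness_get_filenumber : List String := ["track-042.mp3", "9a1"]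

def Spec_get_filenumber (audio_files : List String) (out : List Int) : Prop := out = get_filenumber_alt audio_files
instance (audio_files : List String) (out : List Int) : Decidable (Spec_get_filenumber audio_files out) := by unfold Spec_get_filenumber; infer_instance

-- ===== CLAIM (what is proved, stated in full; the proofs are below) =====
def Claim_equal_get_filenumber : Prop := ∀ (audio_files : List String), Dom_get_filenumber audio_files → Pre_get_filenumber audio_files → Spec_get_filenumber audio_files (get_filenumber audio_files)

-- ===== LEMMAS AND PROOFS =====

def pvFirstTrue (gs : List (Bool × List Char)) : Option (List Char) :=
  ((gs.filter (fun p => p.1)).head?).map (fun p => p.2)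

theorem grp_nil : ∀ (t : List Char), pvGroupby t = [] → t = [] := by
  intro t h
  cases t with
  | nil => rfl
  | cons c t =>
    simp only [pvGroupby] at h
    cases hg : pvGroupby t <;> rw [hg] at h <;> simp at h
    split at h <;> simp at h

theorem takeD_grp : ∀ (t : List Char) (k : Bool) (g : List Char) (rest : List (Bool × List Char)),
    pvGroupby t = (k, g) :: rest → pvTakeD t = if k then g else [] := by
  intro t
  induction t with
  | nil => intro k g rest h; simp [pvGroupby] at h
  | cons c t ih =>
    intro k g rest h
    simp only [pvGroupby] at h
    cases hg : pvGroupby t with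
    | nil =>
      rw [hg] at h
      dsimp only at h
      simp only [List.cons.injEq, Prod.mk.injEq] at h
      obtain ⟨⟨hk, hgg⟩, -⟩ := h
      have ht : t = [] := grp_nil t hg
      subst ht hk hgg
      cases hd : c.isDigit <;> simp [pvTakeD, hd]
    | cons p ps =>
      obtain ⟨k', g'⟩ := p
      rw [hg] at h
      dsimp only at h
      by_cases hc : c.isDigit = k'
      · rw [if_pos hc] at h
        simp only [List.cons.injEq, Prod.mk.injEq] at h
        obtain ⟨⟨hk, hgg⟩, hr⟩ := h
        subst hk hgg
        have := ih k' g' ps hg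
        simp only [pvTakeD]
        cases hk' : k' with
        | false => rw [hk'] at hc; simp [hc]
        | true => rw [hk'] at hc this; simp [hc, this]
      · rw [if_neg hc] at h
        simp only [List.cons.injEq, Prod.mk.injEq] at h
        obtain ⟨⟨hk, hgg⟩, hr⟩ := h
        subst hk hgg
        simp only [pvTakeD]
        cases hd : c.isDigit with
        | false => simp
        | true =>
          rw [hd] at hc
          have hk' : k' = false := by cases k' <;> simp_all
          have := ih k' g' ps hg
          rw [hk'] at this
          simp at this
          simp [this]

theorem firstTrue_grp : ∀ (l : List Char),
    pvFirstTrue (pvGroupby l)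
      = if l.any Char.isDigit then some (pvTakeD (pvSkipND l)) else none := by
  intro l
  induction l with
  | nil => simp [pvGroupby, pvFirstTrue]
  | cons c t ih =>
    cases hd : c.isDigit with
    | true =>
      simp only [List.any_cons, hd, Bool.true_or, if_pos]
      simp only [pvSkipND, hd, if_pos, pvTakeD]
      simp only [pvGroupby]
      cases hg : pvGroupby t with
      | nil =>
        have ht : t = [] := grp_nil t hg
        subst ht
        simp [pvFirstTrue, pvTakeD, hd]
      | cons p ps =>
        obtain ⟨k', g'⟩ := p
        have htd := takeD_grp t k' g' ps hg
        cases hk' : k' with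
        | true =>
          rw [hk'] at htd; simp at htd
          simp [hd, pvFirstTrue, htd]
        | false =>
          rw [hk'] at htd; simp at htd
          simp [hd, pvFirstTrue, htd]
    | false =>
      simp only [List.any_cons, hd, Bool.false_or]
      simp only [pvSkipND, hd, Bool.false_eq_true, ite_false]
      simp only [pvGroupby]
      cases hg : pvGroupby t with
      | nil =>
        have ht : t = [] := grp_nil t hg
        subst ht
        simp [pvFirstTrue, hd]
      | cons p ps =>
        obtain ⟨k', g'⟩ := p
        rw [hg] at ih
        cases hk' : k' with
        | false =>
          subst hk'
          rw [← ih]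
          simp [pvFirstTrue, hd]
        | true =>
          subst hk'
          rw [← ih]
          simp [pvFirstTrue, hd]

theorem elem_eq (x : String) (hx : (x.toList.any Char.isDigit) = true) :
    (PySem.Int.ofStr? ((pvTmpLst x).getD 0 "")).getD 0
      = (PySem.Int.ofStr? (String.ofList (pvTakeD (pvSkipND x.toList)))).getD 0 := by
  have h := firstTrue_grp x.toList
  rw [if_pos hx] at h
  unfold pvFirstTrue at h
  unfold pvTmpLst
  cases hf : ((pvGroupby x.toList).filter (fun p => p.1)) with
  | nil => rw [hf] at h; simp at h
  | cons p ps =>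
    rw [hf] at h
    simp at h
    simp [h]

-- ===== VERDICT (by name: the statement is the Claim_ definition above) =====
theorem get_filenumber_spec : Claim_equal_get_filenumber := by
  intro audio_files _ hpre
  unfold Spec_get_filenumber get_filenumber get_filenumber_alt
  cases audio_files with
  | nil => simp
  | cons x t =>
    simp only [List.isEmpty_cons, ite_false, Bool.false_eq_true]
    apply List.map_congr_left
    intro y hy
    exact elem_eq y (hpre y hy)
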